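-- pv_equiv track=rewrite | github.com/tarunsingh-eng/python-sql-portfolio | python/algorithms/arrays/greaterthanall.py | solve
-- ===== SOURCE A (Python) =====
-- def solve( A):
--     g = 0
--     for y in range(0,len(A)):
--         L=0
--         for k in range(0,y):
--             if A[y]>A[k]:
--                 L +=1
--                 print (L,y-1)
--         if y-1 == L:
--             g +=1
--     return g
-- ===== SOURCE B (Python) =====
-- def solve(A):
--     # One pass: y is counted (y-1 == L) iff exactly one earlier element is >= A[y],
--     # which is decided from the two largest prefix elements (with multiplicity).
--     # Note: B omits A's debug printing; only the return value is equivalent.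
--     g = 0
--     m1 = None  # largest element of the processed prefix
--     m2 = None  # second largest (counting duplicates)
--     for x in A:
--         if m1 is not None and m1 >= x and (m2 is None or m2 < x):
--             g += 1
--         if m1 is None or x >= m1:
--             m1, m2 = x, m1
--         elif m2 is None or x > m2:
--             m2 = x
--     return g
-- ===== Notes on version B (the rewrite author's own statement) =====
-- stated objective: faster
-- what changed: B replaces A's quadratic inner scan of all earlier elements with a single pass that maintains only the two largest prefix elements, since 'y-1 == L' holds exactly when one earlier element is >= A[y]; B omits A's debug printing (return value unchanged).
import Mathlib
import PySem

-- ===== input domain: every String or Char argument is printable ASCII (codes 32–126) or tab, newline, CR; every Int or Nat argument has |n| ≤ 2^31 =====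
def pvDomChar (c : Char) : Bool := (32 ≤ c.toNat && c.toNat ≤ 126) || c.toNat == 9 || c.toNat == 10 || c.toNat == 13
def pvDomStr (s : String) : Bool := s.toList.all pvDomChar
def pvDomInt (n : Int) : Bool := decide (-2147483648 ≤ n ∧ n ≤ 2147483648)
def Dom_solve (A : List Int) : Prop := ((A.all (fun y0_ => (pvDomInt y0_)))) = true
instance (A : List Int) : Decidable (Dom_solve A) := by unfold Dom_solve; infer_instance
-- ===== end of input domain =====

-- B replaces A's quadratic inner scan by a single pass keeping the two largest prefix
-- elements; B omits A's debug printing (a side effect): equivalence is about the return value.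

-- ===== PORT A =====
-- inner loop 'for k in range(0,y): if A[y]>A[k]: L+=1' of A (the print changes no state)
def solveInner (A : List Int) (y : Int) : Int :=
  (PySem.List.pyRange 0 y 1).foldl
    (fun L k => if PySem.List.pyGetD A y 0 > PySem.List.pyGetD A k 0 then L + 1 else L) 0

def solve (A : List Int) : Int :=
  (PySem.List.pyRange 0 (A.length : Int) 1).foldl
    (fun g y => if y - 1 = solveInner A y then g + 1 else g) 0

-- ===== PORT B =====
-- loop body of Source B: state (g, m1, m2); m1/m2 = largest / second largest of the prefix
def solveAltStep (st : Int × Option Int × Option Int) (x : Int) : Int × Option Int × Option Int :=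
  let g := st.1
  let m1 := st.2.1
  let m2 := st.2.2
  let g' : Int :=
    match m1, m2 with
    | none, _ => g
    | some a, none => if a ≥ x then g + 1 else g
    | some a, some b => if a ≥ x ∧ b < x then g + 1 else g
  match m1, m2 with
  | none, m2 => (g', some x, m2)
  | some a, m2 =>
    if x ≥ a then (g', some x, some a)
    else
      match m2 with
      | none => (g', some a, some x)
      | some b => if x > b then (g', some a, some x) else (g', some a, some b)

def solve_alt (A : List Int) : Int :=
  (A.foldl solveAltStep (0, none, none)).1

-- ===== PRECONDITION & SPEC =====
def Spec_solve (A : List Int) (out : Int) : Prop := out = solve_alt A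
instance (A : List Int) (out : Int) : Decidable (Spec_solve A out) := by unfold Spec_solve; infer_instance

-- ===== CLAIM (what is proved, stated in full; the proofs are below) =====
def Claim_equal_solve : Prop := ∀ (A : List Int), Dom_solve A → Spec_solve A (solve A)

-- ===== LEMMAS AND PROOFS =====

-- common bridge: walk the list with its processed prefix p; the head x of the rest is
-- counted iff the prefix is nonempty and exactly one prefix element is ≥ x.
def pvG (p rest : List Int) : Int :=
  match rest with
  | [] => 0
  | x :: r => (if p ≠ [] ∧ p.countP (fun a => decide (x ≤ a)) = 1 then 1 else 0) + pvG (p ++ [x]) r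

-- A's branch test '(y-1 == L)' in terms of the count of prefix elements ≥ x
lemma pv_cond_iff (p : List Int) (x : Int) :
    ((p.length : Int) - 1 = (p.countP (fun a => decide (a < x)) : Int)) ↔
      (p ≠ [] ∧ p.countP (fun a => decide (x ≤ a)) = 1) := by
  have h := List.length_eq_countP_add_countP (l := p) (p := fun a => decide (a < x))
  have h2 : p.countP (fun a => decide ¬decide (a < x) = true) = p.countP (fun a => decide (x ≤ a)) := by
    apply List.countP_congr
    intro a _
    simp [not_lt]
  rw [h2] at h
  have hne : p ≠ [] ↔ 0 < p.length := by
    cases p <;> simp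
  rw [hne]
  omega

-- A's inner loop counts the prefix elements smaller than A[y]
lemma pv_inner_eq (p rest : List Int) :
    solveInner (p ++ rest) (p.length : Int) =
      (p.countP (fun a => decide (a < PySem.List.pyGetD (p ++ rest) (p.length : Int) 0)) : Int) := by
  unfold solveInner
  set v := PySem.List.pyGetD (p ++ rest) (p.length : Int) 0 with hv
  have hcongr : (PySem.List.pyRange 0 (p.length : Int) 1).foldl
      (fun (L : Int) k => if v > PySem.List.pyGetD (p ++ rest) k 0 then L + 1 else L) 0 =
      (PySem.List.pyRange 0 (p.length : Int) 1).foldl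
      (fun (L : Int) k => if v > PySem.List.pyGetD p k 0 then L + 1 else L) 0 := by
    apply PySem.List.foldl_congr_mem
    intro acc k hk
    rw [PySem.List.mem_pyRange_one] at hk
    have hklt : k.toNat < p.length := by omega
    rw [PySem.List.pyGetD_eq_getElem (p ++ rest) 0 hk.1 (by simp; omega),
        PySem.List.pyGetD_eq_getElem p 0 hk.1 (by exact_mod_cast hk.2)]
    rw [List.getElem_append_left hklt]
  refine hcongr.trans ?_
  refine (PySem.List.foldl_pyRange_zero_pyGetD' p 0
      (fun L a => if v > a then L + 1 else L) 0).trans ?_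
  have := PySem.List.foldl_count_if (fun a => decide (a < v)) p 0
  simpa using this

-- the outer index loop of A, started at any split point, computes pvG
lemma pv_A_eq_G (A : List Int) : ∀ (rest p : List Int) (g : Int), A = p ++ rest →
    (PySem.List.pyRange (p.length : Int) (A.length : Int) 1).foldl
      (fun g y => if y - 1 = solveInner A y then g + 1 else g) g = g + pvG p rest := by
  intro rest
  induction rest with
  | nil =>
    intro p g hA
    subst hA
    rw [PySem.List.pyRange_one_eq_nil (by simp)]
    simp [pvG]
  | cons x r ih =>
    intro p g hA
    subst hA
    have hlt : (p.length : Int) < (((p ++ x :: r).length : Int)) := by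
      exact_mod_cast (by simp : p.length < (p ++ x :: r).length)
    rw [PySem.List.pyRange_one_cons hlt]
    simp only [List.foldl_cons]
    have hget : PySem.List.pyGetD (p ++ x :: r) (p.length : Int) 0 = x := by
      rw [PySem.List.pyGetD_natCast]
      simp
    have hinner : solveInner (p ++ x :: r) (p.length : Int) =
        (p.countP (fun a => decide (a < x)) : Int) := by
      rw [pv_inner_eq, hget]
    have hstep : (if (p.length : Int) - 1 = solveInner (p ++ x :: r) (p.length : Int) then g + 1 else g) =
        g + (if p ≠ [] ∧ p.countP (fun a => decide (x ≤ a)) = 1 then 1 else 0) := by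
      rw [hinner]
      rcases (pv_cond_iff p x) with ⟨h1, h2⟩
      split_ifs with hc hd hd
      · ring
      · exact absurd (h1 hc) hd
      · exact absurd (h2 hd) hc
      · ring
    have hlen : ((p ++ [x]).length : Int) = (p.length : Int) + 1 := by simp
    have := ih (p ++ [x]) (g + (if p ≠ [] ∧ p.countP (fun a => decide (x ≤ a)) = 1 then 1 else 0))
      (by simp)
    rw [hlen] at this
    rw [hstep, this]
    simp [pvG]
    ring

-- invariant: (m1, m2) are the largest and second largest elements of the prefix p
def pvInv (p : List Int) (m1 m2 : Option Int) : Prop :=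
  (m1 = none ↔ p = []) ∧
  (∀ x : Int, (∃ a, m1 = some a ∧ x ≤ a) ↔ 1 ≤ p.countP (fun a => decide (x ≤ a))) ∧
  (∀ x : Int, (∃ b, m2 = some b ∧ x ≤ b) ↔ 2 ≤ p.countP (fun a => decide (x ≤ a)))

lemma pv_inv_nil : pvInv [] none none := by
  refine ⟨by simp, ?_, ?_⟩ <;> intro x <;> simp

lemma pv_countP_append (p : List Int) (x y : Int) :
    (p ++ [x]).countP (fun a => decide (y ≤ a)) =
      p.countP (fun a => decide (y ≤ a)) + (if y ≤ x then 1 else 0) := by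
  rw [List.countP_append]
  by_cases h : y ≤ x <;> simp [h]

-- the step of B increments g exactly on pvG's condition and preserves the invariant
lemma pv_step (p : List Int) (g : Int) (m1 m2 : Option Int) (x : Int)
    (hI : pvInv p m1 m2) :
    (solveAltStep (g, m1, m2) x).1 =
        g + (if p ≠ [] ∧ p.countP (fun a => decide (x ≤ a)) = 1 then 1 else 0) ∧
      pvInv (p ++ [x]) (solveAltStep (g, m1, m2) x).2.1 (solveAltStep (g, m1, m2) x).2.2 := by
  obtain ⟨hnil, h1, h2⟩ := hI
  rcases m1 with _ | a
  · -- prefix empty: the new pair is (x, none)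
    have hp : p = [] := hnil.mp rfl
    subst hp
    have hm2 : m2 = none := by
      rcases hm2 : m2 with _ | b
      · rfl
      · have := (h2 b).mp ⟨b, hm2, le_refl b⟩
        simp at this
    subst hm2
    have hse : solveAltStep (g, none, none) x = (g, some x, none) := rfl
    rw [hse]
    refine ⟨by simp, by simp, ?_, ?_⟩
    · intro y
      by_cases hyx : y ≤ x <;> simp [hyx]
    · intro y
      by_cases hyx : y ≤ x <;> simp [hyx]
  · -- prefix nonempty, a = its maximum
    have hpne : p ≠ [] := fun h => absurd (hnil.mpr h) (by simp)
    have ha1 : ∀ y : Int, y ≤ a ↔ 1 ≤ p.countP (fun t => decide (y ≤ t)) := by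
      intro y
      rw [← h1 y]
      simp
    rcases m2 with _ | b
    · -- no second element yet: every count is ≤ 1
      have hb1 : ∀ y : Int, p.countP (fun t => decide (y ≤ t)) ≤ 1 := by
        intro y
        have := (h2 y)
        simp at this
        omega
      by_cases hxa : x ≥ a
      · -- x is the new maximum, a second
        have hse : solveAltStep (g, some a, none) x =
            (if a ≥ x then g + 1 else g, some x, some a) := by
          simp [solveAltStep, hxa]
        rw [hse]
        refine ⟨?_, by simp, ?_, ?_⟩
        · have hA := ha1 x
          have hB := hb1 x
          simp only [hpne, ne_eq, not_false_eq_true, true_and]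
          split_ifs <;> omega
        · intro y
          rw [pv_countP_append]
          simp only [Option.some.injEq, exists_eq_left']
          have hA := ha1 y
          by_cases hyx : y ≤ x
          · rw [if_pos hyx]
            omega
          · rw [if_neg hyx]
            omega
        · intro y
          rw [pv_countP_append]
          simp only [Option.some.injEq, exists_eq_left']
          have hA := ha1 y
          by_cases hyx : y ≤ x
          · rw [if_pos hyx]
            omega
          · rw [if_neg hyx]
            omega
      · -- x < a: x becomes the second element
        have hse : solveAltStep (g, some a, none) x =
            (if a ≥ x then g + 1 else g, some a, some x) := by
          simp [solveAltStep, hxa]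
        rw [hse]
        refine ⟨?_, by simp, ?_, ?_⟩
        · have hA := ha1 x
          have hB := hb1 x
          simp only [hpne, ne_eq, not_false_eq_true, true_and]
          split_ifs <;> omega
        · intro y
          rw [pv_countP_append]
          simp only [Option.some.injEq, exists_eq_left']
          have hA := ha1 y
          by_cases hyx : y ≤ x
          · rw [if_pos hyx]
            omega
          · rw [if_neg hyx]
            omega
        · intro y
          rw [pv_countP_append]
          simp only [Option.some.injEq, exists_eq_left']
          have hA := ha1 y
          have hB := hb1 y
          by_cases hyx : y ≤ x
          · rw [if_pos hyx]
            omega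
          · rw [if_neg hyx]
            omega
    · -- second element b present
      have hb2 : ∀ y : Int, y ≤ b ↔ 2 ≤ p.countP (fun t => decide (y ≤ t)) := by
        intro y
        rw [← h2 y]
        simp
      have hba : b ≤ a := by
        have h2b := (hb2 b).mp le_rfl
        have hab := ha1 b
        omega
      by_cases hxa : x ≥ a
      · -- x new maximum, a second
        have hse : solveAltStep (g, some a, some b) x =
            (if a ≥ x ∧ b < x then g + 1 else g, some x, some a) := by
          simp [solveAltStep, hxa]
        rw [hse]
        refine ⟨?_, by simp, ?_, ?_⟩
        · have hA := ha1 x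
          have hB := hb2 x
          simp only [hpne, ne_eq, not_false_eq_true, true_and]
          split_ifs <;> omega
        · intro y
          rw [pv_countP_append]
          simp only [Option.some.injEq, exists_eq_left']
          have hA := ha1 y
          by_cases hyx : y ≤ x
          · rw [if_pos hyx]
            omega
          · rw [if_neg hyx]
            omega
        · intro y
          rw [pv_countP_append]
          simp only [Option.some.injEq, exists_eq_left']
          have hA := ha1 y
          have hB := hb2 y
          by_cases hyx : y ≤ x
          · rw [if_pos hyx]
            omega
          · rw [if_neg hyx]
            omega
      · by_cases hxb : x > b
        · -- b < x < a: x becomes the second element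
          have hse : solveAltStep (g, some a, some b) x =
              (if a ≥ x ∧ b < x then g + 1 else g, some a, some x) := by
            simp [solveAltStep, hxa, hxb]
          rw [hse]
          refine ⟨?_, by simp, ?_, ?_⟩
          · have hA := ha1 x
            have hB := hb2 x
            simp only [hpne, ne_eq, not_false_eq_true, true_and]
            split_ifs <;> omega
          · intro y
            rw [pv_countP_append]
            simp only [Option.some.injEq, exists_eq_left']
            have hA := ha1 y
            by_cases hyx : y ≤ x
            · rw [if_pos hyx]
              omega
            · rw [if_neg hyx]
              omega
          · intro y
            rw [pv_countP_append]
            simp only [Option.some.injEq, exists_eq_left']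
            have hA := ha1 y
            have hB := hb2 y
            by_cases hyx : y ≤ x
            · rw [if_pos hyx]
              omega
            · rw [if_neg hyx]
              omega
        · -- x ≤ b: top two unchanged
          have hse : solveAltStep (g, some a, some b) x =
              (if a ≥ x ∧ b < x then g + 1 else g, some a, some b) := by
            simp [solveAltStep, hxa, hxb]
          rw [hse]
          refine ⟨?_, by simp, ?_, ?_⟩
          · have hA := ha1 x
            have hB := hb2 x
            simp only [hpne, ne_eq, not_false_eq_true, true_and]
            split_ifs <;> omega
          · intro y
            rw [pv_countP_append]
            simp only [Option.some.injEq, exists_eq_left']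
            have hA := ha1 y
            by_cases hyx : y ≤ x
            · rw [if_pos hyx]
              omega
            · rw [if_neg hyx]
              omega
          · intro y
            rw [pv_countP_append]
            simp only [Option.some.injEq, exists_eq_left']
            have hA := ha1 y
            have hB := hb2 y
            by_cases hyx : y ≤ x
            · rw [if_pos hyx]
              omega
            · rw [if_neg hyx]
              omega

lemma pv_B_eq_G : ∀ (rest p : List Int) (g : Int) (m1 m2 : Option Int), pvInv p m1 m2 →
    (rest.foldl solveAltStep (g, m1, m2)).1 = g + pvG p rest := by
  intro rest
  induction rest with
  | nil => intro p g m1 m2 _; simp [pvG]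
  | cons x r ih =>
    intro p g m1 m2 hI
    obtain ⟨hg, hI'⟩ := pv_step p g m1 m2 x hI
    simp only [List.foldl_cons]
    have : solveAltStep (g, m1, m2) x =
        ((solveAltStep (g, m1, m2) x).1, (solveAltStep (g, m1, m2) x).2.1,
          (solveAltStep (g, m1, m2) x).2.2) := rfl
    rw [this, ih (p ++ [x]) _ _ _ hI', hg]
    simp [pvG]
    ring

-- ===== VERDICT (by name: the statement is the Claim_ definition above) =====
theorem solve_spec : Claim_equal_solve := by
  intro A _
  unfold Spec_solve
  have hA := pv_A_eq_G A A [] 0 (by simp)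
  have hB := pv_B_eq_G A [] 0 none none pv_inv_nil
  unfold solve solve_alt
  simp only [List.length_nil, Int.natCast_zero] at hA
  rw [hA, hB]
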